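-- pv_equiv track=rewrite | github.com/sifedi/site-de-matrice | app.py | produit_matrice_triangulaire_inferieure_demi_bande_vecteur
-- ===== SOURCE A (Python) =====
-- def matrice_demi_bande_inf(matrice,n,largeur):
--     m= largeur-1
--     for i in range(n):
--         for j in range(n):
--             if (i<j or i-j>m) and matrice[i][j]!=0:
--                 return False
--     return True
--
-- def produit_matrice_triangulaire_inferieure_demi_bande_vecteur(matrice, vecteur, n, largeur):
--     demi_bande=largeur-1
--
--     resultat = [0] * n
--     if not matrice_demi_bande_inf(matrice,n,largeur):
--         raise ValueError("Attention!\nVotre matrice n'est pas une matrice demi-bande inférieure")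
--
--     for i in range(n):
--         for j in range(max(0, i - demi_bande ), i + 1):
--             resultat[i] += matrice[i][j] * vecteur[j]
--
--     return resultat
-- ===== SOURCE B (Python) =====
-- def produit_matrice_triangulaire_inferieure_demi_bande_vecteur(matrice, vecteur, n, largeur):
--     d = largeur - 1
--     resultat = [0] * n
--     # column-major (transposed) traversal: for each column j, validate the cells of
--     # that column and scatter its contribution matrice[i][j]*vecteur[j] into resultat[i]
--     for j in range(n):
--         for i in range(n):
--             a = matrice[i][j]
--             if i < j or i - j > d:
--                 if a != 0:
--                     raise ValueError("Attention!\nVotre matrice n'est pas une matrice demi-bande inférieure")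
--             else:
--                 resultat[i] += a * vecteur[j]
--     return resultat
-- ===== Notes on version B (the rewrite author's own statement) =====
-- stated objective: alternative
-- what changed: B replaces A's two row-major passes (full validation scan, then per-row gather of the banded dot product) with a single column-major (transposed) traversal that validates each column's cells and scatters the column's contribution matrice[i][j]*vecteur[j] into resultat[i]; each resultat[i] is thus accumulated across the outer loop instead of finished in one inner loop, which is correct because integer addition is commutative and associative.
import Mathlib
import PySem

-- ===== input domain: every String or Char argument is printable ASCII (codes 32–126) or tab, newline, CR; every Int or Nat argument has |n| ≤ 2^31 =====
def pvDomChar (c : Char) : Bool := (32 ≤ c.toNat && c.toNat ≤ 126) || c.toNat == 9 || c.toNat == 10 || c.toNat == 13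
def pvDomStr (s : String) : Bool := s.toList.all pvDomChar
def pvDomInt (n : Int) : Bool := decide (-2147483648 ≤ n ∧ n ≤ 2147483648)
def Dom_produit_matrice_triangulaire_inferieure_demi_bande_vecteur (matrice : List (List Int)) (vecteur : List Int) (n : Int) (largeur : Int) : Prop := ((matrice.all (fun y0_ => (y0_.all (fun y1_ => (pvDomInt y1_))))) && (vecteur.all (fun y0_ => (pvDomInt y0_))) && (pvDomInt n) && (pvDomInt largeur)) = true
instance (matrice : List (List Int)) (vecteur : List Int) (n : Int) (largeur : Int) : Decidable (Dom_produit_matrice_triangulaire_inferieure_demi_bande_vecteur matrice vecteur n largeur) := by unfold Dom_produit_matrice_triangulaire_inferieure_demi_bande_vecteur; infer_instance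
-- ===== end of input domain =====

-- B replaces A's two row-major passes (full validation, then per-row gather of the banded dot
-- product) by ONE column-major (transposed) traversal that validates each column and scatters
-- matrice[i][j]*vecteur[j] into resultat[i] (alternative decomposition, same cost; correct because
-- integer addition commutes); where the Python raises (ValueError / IndexError) the ports return
-- a dummy value and Pre_ excludes those inputs.

-- ===== PORT A =====
-- helper of A: the early 'return False' is the Bool 'all' short-circuit
def matrice_demi_bande_inf (matrice : List (List Int)) (n : Int) (largeur : Int) : Bool :=
  let m := largeur - 1
  (PySem.List.pyRange 0 n 1).all (fun i =>
    (PySem.List.pyRange 0 n 1).all (fun j =>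
      !((decide (i < j) || decide (i - j > m)) &&
        (PySem.List.pyGetD (PySem.List.pyGetD matrice i []) j 0 != 0))))

def produit_matrice_triangulaire_inferieure_demi_bande_vecteur (matrice : List (List Int)) (vecteur : List Int) (n : Int) (largeur : Int) : List Int :=
  let demi_bande := largeur - 1
  let resultat : List Int := List.replicate n.toNat 0
  if !(matrice_demi_bande_inf matrice n largeur) then
    []  -- Python raises ValueError here; Pre_ excludes these inputs
  else
    (PySem.List.pyRange 0 n 1).foldl (fun res i =>
      (PySem.List.pyRange (max 0 (i - demi_bande)) (i + 1) 1).foldl (fun r j =>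
        PySem.List.pySetD r i (PySem.List.pyGetD r i 0 +
          PySem.List.pyGetD (PySem.List.pyGetD matrice i []) j 0 * PySem.List.pyGetD vecteur j 0)) res)
      resultat

-- ===== PORT B =====
-- one cell (i of column j) of B's column-major loop: validate or scatter (the raise becomes none)
def pvCell (matrice : List (List Int)) (vecteur : List Int) (d : Int) (j : Int)
    (st : Option (List Int)) (i : Int) : Option (List Int) :=
  match st with
  | none => none  -- the ValueError was already raised
  | some resultat =>
    let a := PySem.List.pyGetD (PySem.List.pyGetD matrice i []) j 0
    if decide (i < j) || decide (i - j > d) then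
      if a != 0 then none  -- raise ValueError; Pre_ excludes these inputs
      else some resultat
    else
      some (PySem.List.pySetD resultat i
        (PySem.List.pyGetD resultat i 0 + a * PySem.List.pyGetD vecteur j 0))

def produit_matrice_triangulaire_inferieure_demi_bande_vecteur_alt (matrice : List (List Int)) (vecteur : List Int) (n : Int) (largeur : Int) : List Int :=
  let d := largeur - 1
  let resultat : List Int := List.replicate n.toNat 0
  (((PySem.List.pyRange 0 n 1).foldl
      (fun st j => (PySem.List.pyRange 0 n 1).foldl (pvCell matrice vecteur d j) st)
      (some resultat)).getD [])

-- ===== PRECONDITION & SPEC =====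
-- Pre_ = exactly the inputs where Python A returns: the first n rows are present and long enough
-- (else IndexError), the vector is long enough whenever the product loop reads it (largeur ≥ 1;
-- for largeur ≤ 0 A never touches vecteur), and every entry of the leading n×n block outside the
-- lower half-band is 0 (else ValueError).
def Pre_produit_matrice_triangulaire_inferieure_demi_bande_vecteur (matrice : List (List Int)) (vecteur : List Int) (n : Int) (largeur : Int) : Prop :=
  n.toNat ≤ matrice.length ∧ (1 ≤ largeur → n.toNat ≤ vecteur.length) ∧
  (∀ i < n.toNat, n.toNat ≤ (matrice.getD i []).length) ∧
  (∀ i < n.toNat, ∀ j < n.toNat,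
    ((i : Int) < (j : Int) ∨ (i : Int) - (j : Int) > largeur - 1) → (matrice.getD i []).getD j 0 = 0)
instance (matrice : List (List Int)) (vecteur : List Int) (n : Int) (largeur : Int) : Decidable (Pre_produit_matrice_triangulaire_inferieure_demi_bande_vecteur matrice vecteur n largeur) := by unfold Pre_produit_matrice_triangulaire_inferieure_demi_bande_vecteur; infer_instance

def pvWitness_produit_matrice_triangulaire_inferieure_demi_bande_vecteur : List (List Int) × List Int × Int × Int := ([[2, 0], [5, 3]], [1, 4], 2, 2)

def Spec_produit_matrice_triangulaire_inferieure_demi_bande_vecteur (matrice : List (List Int)) (vecteur : List Int) (n : Int) (largeur : Int) (out : List Int) : Prop := out = produit_matrice_triangulaire_inferieure_demi_bande_vecteur_alt matrice vecteur n largeur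
instance (matrice : List (List Int)) (vecteur : List Int) (n : Int) (largeur : Int) (out : List Int) : Decidable (Spec_produit_matrice_triangulaire_inferieure_demi_bande_vecteur matrice vecteur n largeur out) := by unfold Spec_produit_matrice_triangulaire_inferieure_demi_bande_vecteur; infer_instance

-- ===== CLAIM (what is proved, stated in full; the proofs are below) =====
def Claim_equal_produit_matrice_triangulaire_inferieure_demi_bande_vecteur : Prop := ∀ (matrice : List (List Int)) (vecteur : List Int) (n : Int) (largeur : Int), Dom_produit_matrice_triangulaire_inferieure_demi_bande_vecteur matrice vecteur n largeur → Pre_produit_matrice_triangulaire_inferieure_demi_bande_vecteur matrice vecteur n largeur → Spec_produit_matrice_triangulaire_inferieure_demi_bande_vecteur matrice vecteur n largeur (produit_matrice_triangulaire_inferieure_demi_bande_vecteur matrice vecteur n largeur)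

-- ===== LEMMAS AND PROOFS =====

-- the contribution of cell (row k, column j) as B scatters it: 0 out of band, m[k][j]*v[j] in band
def pvW (matrice : List (List Int)) (vecteur : List Int) (d : Int) (j k : Nat) : Int :=
  if (k : Int) < (j : Int) ∨ (k : Int) - (j : Int) > d then 0
  else PySem.List.pyGetD (PySem.List.pyGetD matrice (k : Int) []) (j : Int) 0 *
       PySem.List.pyGetD vecteur (j : Int) 0

-- the value A accumulates into row k: the banded dot product exactly as A sums it
def pvRowSum (matrice : List (List Int)) (vecteur : List Int) (largeur : Int) (k : Nat) : Int :=
  ((PySem.List.pyRange (max 0 ((k : Int) - (largeur - 1))) ((k : Int) + 1) 1).map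
    (fun j => PySem.List.pyGetD (PySem.List.pyGetD matrice (k : Int) []) j 0 *
              PySem.List.pyGetD vecteur j 0)).sum

-- A's inner loop only reads and writes index k: it adds the sum of f over L at index k
theorem pv_inner_set (f : Int → Int) : ∀ (L : List Int) (res : List Int) (k : Nat), k < res.length →
    L.foldl (fun r j => (r.set k (r.getD k 0 + f j))) res
      = res.set k (res.getD k 0 + (L.map f).sum) := by
  intro L
  induction L with
  | nil =>
    intro res k hk
    rw [List.getD_eq_getElem _ _ hk]
    simp [List.set_getElem_self]
  | cons a L ih =>
    intro res k hk
    simp only [List.foldl_cons]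
    rw [ih _ k (by simpa using hk)]
    rw [List.set_set]
    have h1 : (res.set k (res.getD k 0 + f a)).getD k 0 = res.getD k 0 + f a := by
      rw [List.getD_eq_getElem _ _ (by simpa using hk)]
      simp [List.getElem_set_self]
    rw [h1]
    simp [add_assoc]

-- same statement with the PySem primitives A's port uses
theorem pv_inner_set' (f : Int → Int) (L : List Int) (res : List Int) (k : Nat)
    (hk : k < res.length) :
    L.foldl (fun r j => PySem.List.pySetD r (k : Int) (PySem.List.pyGetD r (k : Int) 0 + f j)) res
      = res.set k (res.getD k 0 + (L.map f).sum) := by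
  have hfun : (fun r j => PySem.List.pySetD r (k : Int) (PySem.List.pyGetD r (k : Int) 0 + f j))
      = (fun (r : List Int) j => r.set k (r.getD k 0 + f j)) := by
    funext r j
    rw [PySem.List.pySetD_natCast, PySem.List.pyGetD_natCast]
  rw [hfun, pv_inner_set f L res k hk]

-- a fold that sets index k to (current value + S k) for k = 0..M-1 rewrites the processed prefix
theorem pv_foldl_step_eq (step : List Int → Nat → List Int) (S : Nat → Int) (N : Nat)
    (hstep : ∀ res k, res.length = N → k < N → step res k = res.set k (res.getD k 0 + S k)) :
    ∀ (M : Nat) (res : List Int), M ≤ N → res.length = N →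
    (List.range M).foldl step res
      = (List.range M).map (fun k => res.getD k 0 + S k) ++ res.drop M := by
  intro M
  induction M with
  | zero => intro res _ _; simp
  | succ M ih =>
    intro res hM hlen
    rw [List.range_succ, List.foldl_append, List.foldl_cons, List.foldl_nil]
    rw [ih res (by omega) hlen]
    set P := (List.range M).map (fun k => res.getD k 0 + S k) ++ res.drop M with hP
    have hPlen : P.length = N := by
      simp [hP, hlen]; omega
    rw [hstep P M hPlen (by omega)]
    have hMlt : M < res.length := by omega
    have hmapLen : ((List.range M).map (fun k => res.getD k 0 + S k)).length = M := by simp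
    have hdrop : res.drop M = res[M] :: res.drop (M+1) := by
      rw [List.drop_eq_getElem_cons (by omega)]
    have hgetP : P.getD M 0 = res.getD M 0 := by
      rw [hP, hdrop]
      rw [List.getD_eq_getElem _ _ (by simp; omega)]
      rw [List.getElem_append_right (by omega)]
      simp [List.getElem?_eq_getElem hMlt]
    have hset : P.set M (res.getD M 0 + S M)
        = (List.range M ++ [M]).map (fun k => res.getD k 0 + S k) ++ res.drop (M+1) := by
      rw [hP, hdrop]
      rw [List.set_append_right _ _ (by simp)]
      simp only [hmapLen, Nat.sub_self, List.set_cons_zero, List.map_append]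
      simp
    rw [hgetP, hset]

-- threading the Option state: as long as the step succeeds and preserves the invariant,
-- the Option fold is the plain fold
theorem pv_opt_fold {σ : Type} (step : Option σ → Int → Option σ) (g : σ → Int → σ)
    (inv : σ → Prop) :
    ∀ (L : List Int), (∀ i ∈ L, ∀ r, inv r → step (some r) i = some (g r i) ∧ inv (g r i)) →
    ∀ r, inv r → L.foldl step (some r) = some (L.foldl g r) := by
  intro L
  induction L with
  | nil => intro _ r _; simp
  | cons a L ih =>
    intro h r hr
    obtain ⟨heq, hinv⟩ := h a (by simp) r hr
    rw [List.foldl_cons, heq, ih (fun i hi => h i (by simp [hi])) _ hinv, List.foldl_cons]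

-- (range N).map (fun k => r.getD k 0) reconstructs r
theorem pv_map_getD (r : List Int) (N : Nat) (hr : r.length = N) :
    (List.range N).map (fun k => r.getD k 0) = r := by
  apply List.ext_getElem
  · simp [hr]
  · intro t h1 h2
    simp only [List.getElem_map, List.getElem_range]
    rw [List.getD_eq_getElem _ _ (by omega)]

-- one cell of B under the zero condition: scattering pvW (the no-op branch is a set of the old value)
theorem pv_cell_eq (matrice : List (List Int)) (vecteur : List Int) (d : Int) (N : Nat)
    (h4 : ∀ i < N, ∀ j < N, ((i : Int) < (j : Int) ∨ (i : Int) - (j : Int) > d) →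
      (matrice.getD i []).getD j 0 = 0)
    (j k : Nat) (hj : j < N) (hk : k < N) (r : List Int) (hr : r.length = N) :
    pvCell matrice vecteur d (j : Int) (some r) (k : Int)
      = some (r.set k (r.getD k 0 + pvW matrice vecteur d j k)) := by
  simp only [pvCell]
  by_cases hc : ((k : Int) < (j : Int) ∨ (k : Int) - (j : Int) > d)
  · have hz : PySem.List.pyGetD (PySem.List.pyGetD matrice (k : Int) []) (j : Int) 0 = 0 := by
      rw [PySem.List.pyGetD_natCast, PySem.List.pyGetD_natCast]
      exact h4 k hk j hj hc
    have hcb : (decide ((k : Int) < (j : Int)) || decide ((k : Int) - (j : Int) > d)) = true := by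
      simp only [Bool.or_eq_true, decide_eq_true_eq]
      omega
    rw [if_pos hcb, hz]
    simp only [bne_self_eq_false, Bool.false_eq_true, if_false]
    rw [pvW, if_pos hc, add_zero, List.getD_eq_getElem _ _ (by omega), List.set_getElem_self]
  · have hcb : (decide ((k : Int) < (j : Int)) || decide ((k : Int) - (j : Int) > d)) = false := by
      simp only [Bool.or_eq_false_iff, decide_eq_false_iff_not]
      omega
    rw [if_neg (by rw [hcb]; exact Bool.false_ne_true)]
    rw [PySem.List.pySetD_natCast, PySem.List.pyGetD_natCast r, pvW, if_neg hc]

-- B's inner loop over i processes column j: every row k gains pvW j k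
theorem pv_inner_col (matrice : List (List Int)) (vecteur : List Int) (d : Int) (N : Nat)
    (h4 : ∀ i < N, ∀ j < N, ((i : Int) < (j : Int) ∨ (i : Int) - (j : Int) > d) →
      (matrice.getD i []).getD j 0 = 0)
    (j : Nat) (hj : j < N) (r : List Int) (hr : r.length = N) :
    (PySem.List.pyRange 0 (N : Int) 1).foldl (pvCell matrice vecteur d (j : Int)) (some r)
      = some ((List.range N).map (fun k => r.getD k 0 + pvW matrice vecteur d j k)) := by
  rw [pv_opt_fold _ (fun r i => r.set i.toNat (r.getD i.toNat 0 + pvW matrice vecteur d j i.toNat))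
      (fun r => r.length = N) _ ?_ r hr]
  · congr 1
    rw [PySem.List.pyRange_zero_nat, List.foldl_map]
    simp only [Int.toNat_natCast]
    rw [pv_foldl_step_eq (fun r k => r.set k (r.getD k 0 + pvW matrice vecteur d j k))
        (pvW matrice vecteur d j) N (by intro res k _ _; rfl) N r le_rfl hr]
    simp [hr]
  · intro i hi r' hr'
    rw [PySem.List.mem_pyRange_one] at hi
    have hik : ((i.toNat : Int)) = i := by omega
    constructor
    · rw [← hik, pv_cell_eq matrice vecteur d N h4 j i.toNat hj (by omega) r' hr']
      simp only [Int.toNat_natCast]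
    · simp [hr']

-- the outer fold over the columns: row k accumulates the sum of its column contributions
theorem pv_outer (N : Nat) (W : Nat → Nat → Int) :
    ∀ (Js : List Nat) (r : List Int), r.length = N →
    Js.foldl (fun r jj => (List.range N).map (fun k => r.getD k 0 + W jj k)) r
      = (List.range N).map (fun k => r.getD k 0 + (Js.map (fun jj => W jj k)).sum) := by
  intro Js
  induction Js with
  | nil =>
    intro r hr
    simp only [List.foldl_nil, List.map_nil, List.sum_nil, add_zero]
    exact (pv_map_getD r N hr).symm
  | cons a Js ih =>
    intro r hr
    rw [List.foldl_cons, ih _ (by simp)]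
    apply List.ext_getElem
    · simp
    · intro t h1 h2
      simp only [List.getElem_map, List.getElem_range]
      have hg : ((List.range N).map (fun k => r.getD k 0 + W a k)).getD t 0
          = r.getD t 0 + W a t := by
        rw [List.getD_eq_getElem _ _ (by simpa using h2)]
        simp
      rw [hg]
      simp [add_assoc]

-- bridge: a sum of a map over List.range is the Finset.range sum
theorem pv_sum_range (f : Nat → Int) : ∀ (N : Nat),
    ((List.range N).map f).sum = ∑ t ∈ Finset.range N, f t := by
  intro N
  induction N with
  | zero => simp
  | succ N ih => rw [List.range_succ, Finset.sum_range_succ, List.map_append]; simp [ih]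

-- the column contributions of row k sum to A's banded dot product
theorem pv_row_eq (matrice : List (List Int)) (vecteur : List Int) (largeur : Int) (N : Nat)
    (k : Nat) (hk : k < N) :
    pvRowSum matrice vecteur largeur k
      = ((List.range N).map (fun j => pvW matrice vecteur (largeur - 1) j k)).sum := by
  set d := largeur - 1 with hd
  set f : Nat → Int := fun j => PySem.List.pyGetD (PySem.List.pyGetD matrice (k : Int) []) (j : Int) 0 *
       PySem.List.pyGetD vecteur (j : Int) 0 with hf
  set lo : Int := max 0 ((k : Int) - d) with hlo
  have hlo0 : 0 ≤ lo := le_max_left 0 _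
  set p : Nat := lo.toNat with hp
  set c : Nat := ((k : Int) + 1 - lo).toNat with hc
  -- left side: the contiguous in-band sum as a Finset.Ico sum
  have hL : pvRowSum matrice vecteur largeur k = ∑ j ∈ Finset.Ico p (p + c), f j := by
    rw [pvRowSum, ← hd, ← hlo, PySem.List.pyRange_one, List.map_map, ← hc]
    have hmap : (List.range c).map ((fun j => PySem.List.pyGetD (PySem.List.pyGetD matrice (k : Int) []) j 0 *
        PySem.List.pyGetD vecteur j 0) ∘ (fun t : Nat => lo + (t : Int)))
        = (List.range c).map (fun t => f (p + t)) := by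
      apply List.map_congr_left
      intro t _
      have harg : lo + (t : Int) = (((p + t : Nat) : Int)) := by omega
      simp only [Function.comp_apply]
      rw [harg]
    rw [hmap, pv_sum_range, Finset.sum_Ico_eq_sum_range]
    simp
  -- right side: the indicator sum over all columns as the same Finset.Ico sum
  have hR : ((List.range N).map (fun j => pvW matrice vecteur d j k)).sum
      = ∑ j ∈ Finset.Ico p (p + c), f j := by
    rw [pv_sum_range]
    have hsplit : (∑ j ∈ Finset.range N, pvW matrice vecteur d j k)
        = ∑ j ∈ Finset.range N, if j ∈ Finset.Ico p (p + c) then f j else 0 := by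
      apply Finset.sum_congr rfl
      intro j hj
      rw [Finset.mem_range] at hj
      rw [pvW]
      by_cases hb : ((k : Int) < (j : Int) ∨ (k : Int) - (j : Int) > d)
      · rw [if_pos hb, if_neg]
        rw [Finset.mem_Ico]
        omega
      · rw [if_neg hb, if_pos, hf]
        rw [Finset.mem_Ico]
        omega
    rw [hsplit, Finset.sum_ite_mem]
    congr 1
    apply Finset.ext
    intro j
    simp only [Finset.mem_inter, Finset.mem_range, Finset.mem_Ico]
    omega
  rw [hL]
  exact hR.symm

-- under Pre_, A's validation helper returns True
theorem pv_band_true (matrice : List (List Int)) (n : Int) (largeur : Int)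
    (h4 : ∀ i < n.toNat, ∀ j < n.toNat,
      ((i : Int) < (j : Int) ∨ (i : Int) - (j : Int) > largeur - 1) → (matrice.getD i []).getD j 0 = 0) :
    matrice_demi_bande_inf matrice n largeur = true := by
  unfold matrice_demi_bande_inf
  refine List.all_eq_true.mpr ?_
  intro i hi
  refine List.all_eq_true.mpr ?_
  intro j hj
  rw [PySem.List.mem_pyRange_one] at hi hj
  by_cases hc : (i < j ∨ i - j > largeur - 1)
  · have hi' : ((i.toNat : Int)) = i := by omega
    have hj' : ((j.toNat : Int)) = j := by omega
    have hz : PySem.List.pyGetD (PySem.List.pyGetD matrice i []) j 0 = 0 := by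
      rw [← hi', ← hj', PySem.List.pyGetD_natCast, PySem.List.pyGetD_natCast]
      exact h4 i.toNat (by omega) j.toNat (by omega) (by rw [hi', hj']; exact hc)
    simp [hz]
  · have hc1 : ¬ i < j := fun h => hc (Or.inl h)
    simp [hc1]
    left
    omega

theorem produit_spec_aux (matrice : List (List Int)) (vecteur : List Int) (n : Int) (largeur : Int)
    (hpre : Pre_produit_matrice_triangulaire_inferieure_demi_bande_vecteur matrice vecteur n largeur) :
    produit_matrice_triangulaire_inferieure_demi_bande_vecteur matrice vecteur n largeur
      = produit_matrice_triangulaire_inferieure_demi_bande_vecteur_alt matrice vecteur n largeur := by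
  obtain ⟨h1, h2, h3, h4⟩ := hpre
  by_cases hn : 0 ≤ n
  · have hband := pv_band_true matrice n largeur h4
    have hNn : n = (n.toNat : Int) := by omega
    set N := n.toNat with hN
    -- A reduces to a map of pvRowSum over the row indices
    have hA : produit_matrice_triangulaire_inferieure_demi_bande_vecteur matrice vecteur n largeur
        = (List.range N).map (fun k => (0:Int) + pvRowSum matrice vecteur largeur k) := by
      unfold produit_matrice_triangulaire_inferieure_demi_bande_vecteur
      simp only [hband, Bool.not_true, Bool.false_eq_true, if_false]
      rw [hNn, PySem.List.pyRange_zero_nat, List.foldl_map]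
      simp only [Int.toNat_natCast]
      rw [pv_foldl_step_eq _ (pvRowSum matrice vecteur largeur) N
          (by
            intro res k hlen hk
            exact pv_inner_set' _ _ res k (by omega))
          N (List.replicate N 0) le_rfl (by simp)]
      simp
    -- B reduces to a map of column-contribution sums over the row indices
    have h4' : ∀ i < N, ∀ j < N,
        ((i : Int) < (j : Int) ∨ (i : Int) - (j : Int) > largeur - 1) →
        (matrice.getD i []).getD j 0 = 0 := h4
    have hB : produit_matrice_triangulaire_inferieure_demi_bande_vecteur_alt matrice vecteur n largeur
        = (List.range N).map (fun k =>
            (0:Int) + ((List.range N).map (fun j => pvW matrice vecteur (largeur - 1) j k)).sum) := by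
      show (((PySem.List.pyRange 0 n 1).foldl
          (fun st j => (PySem.List.pyRange 0 n 1).foldl (pvCell matrice vecteur (largeur - 1) j) st)
          (some (List.replicate n.toNat 0))).getD []) = _
      rw [hNn]
      simp only [Int.toNat_natCast]
      rw [pv_opt_fold _ (fun r jj => (List.range N).map
            (fun k => r.getD k 0 + pvW matrice vecteur (largeur - 1) jj.toNat k))
          (fun r => r.length = N) _ ?_ (List.replicate N 0) (by simp)]
      · simp only [Option.getD_some]
        rw [PySem.List.pyRange_zero_nat, List.foldl_map]
        simp only [Int.toNat_natCast]
        rw [pv_outer N _ (List.range N) (List.replicate N 0) (by simp)]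
        apply List.map_congr_left
        intro k hk
        rw [List.mem_range] at hk
        congr 1
        rw [List.getD_eq_getElem _ _ (by simp; omega)]
        simp
      · intro jj hjj r hr
        rw [PySem.List.mem_pyRange_one] at hjj
        have hjk : ((jj.toNat : Int)) = jj := by omega
        constructor
        · rw [← hjk, pv_inner_col matrice vecteur (largeur - 1) N h4' jj.toNat (by omega) r hr]
          simp only [Int.toNat_natCast]
        · simp
    rw [hA, hB]
    apply List.map_congr_left
    intro k hk
    rw [List.mem_range] at hk
    rw [pv_row_eq matrice vecteur largeur N k hk]
  · -- n < 0: no rows or columns; both return []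
    have h0 : n.toNat = 0 := by omega
    have hnil : PySem.List.pyRange 0 n 1 = [] := PySem.List.pyRange_one_eq_nil (by omega)
    unfold produit_matrice_triangulaire_inferieure_demi_bande_vecteur
      produit_matrice_triangulaire_inferieure_demi_bande_vecteur_alt matrice_demi_bande_inf
    simp [hnil, h0]

-- ===== VERDICT (by name: the statement is the Claim_ definition above) =====
theorem produit_matrice_triangulaire_inferieure_demi_bande_vecteur_spec : Claim_equal_produit_matrice_triangulaire_inferieure_demi_bande_vecteur := by
  intro matrice vecteur n largeur _ hpre
  exact produit_spec_aux matrice vecteur n largeur hpre
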